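-- pv_equiv track=rewrite | github.com/BrayanOrtizC/Taller1Programaci-nMN | Ejercicio2.py | hacer_unicos
-- ===== SOURCE A (Python) =====
-- def hacer_unicos(arr):
--     seen = set()
--     operaciones = 0
--
--     for i in range(len(arr)):
--         original = arr[i]
--         incrementos = 0
--         decrementos = 0
--
--         # Contar incrementos necesarios para encontrar un número único
--         while (original + incrementos) in seen:
--             incrementos += 1
--
--         # Contar decrementos necesarios para encontrar un número único
--         while (original - decrementos) in seen:
--             decrementos += 1
--
--         # Escoger la opción con menos operaciones
--         if incrementos <= decrementos:
--             arr[i] = original + incrementos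
--             operaciones += incrementos
--         else:
--             arr[i] = original - decrementos
--             operaciones += decrementos
--
--         seen.add(arr[i])
--
--     return arr, operaciones
-- ===== SOURCE B (Python) =====
-- def hacer_unicos(arr):
--     seen = set()
--     out = []
--     operaciones = 0
--     for x in arr:
--         # single bidirectional probe: try x+k then x-k for k = 0, 1, 2, ...
--         # (preferring the upward candidate on the tie)
--         k = 0
--         while True:
--             if (x + k) not in seen:
--                 v = x + k
--                 break
--             if (x - k) not in seen:
--                 v = x - k
--                 break
--             k += 1
--         seen.add(v)
--         out.append(v)
--         operaciones += k
--     arr[:] = out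
--     return arr, operaciones
-- ===== Notes on version B (the rewrite author's own statement) =====
-- stated objective: alternative
-- what changed: A runs two independent one-directional scans (all increments, then all decrements) per element and then compares them; B does a single interleaved bidirectional probe k = 0,1,2,... that stops at the first free value x+k or x-k (preferring x+k), so the comparison and the longer of the two scans disappear; B also builds the output list instead of mutating indices (it still writes the result back into arr, matching A's in-place mutation).
import Mathlib
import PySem

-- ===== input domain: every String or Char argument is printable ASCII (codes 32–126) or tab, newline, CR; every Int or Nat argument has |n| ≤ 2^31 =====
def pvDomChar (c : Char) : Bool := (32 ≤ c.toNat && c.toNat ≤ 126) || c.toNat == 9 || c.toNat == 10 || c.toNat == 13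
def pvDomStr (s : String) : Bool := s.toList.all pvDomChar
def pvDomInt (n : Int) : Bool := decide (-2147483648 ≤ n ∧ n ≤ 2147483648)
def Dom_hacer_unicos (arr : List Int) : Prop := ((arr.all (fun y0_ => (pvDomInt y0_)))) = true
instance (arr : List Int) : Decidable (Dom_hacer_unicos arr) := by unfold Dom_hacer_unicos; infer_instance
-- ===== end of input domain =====

-- B replaces A's two independent one-directional scans plus tie-break comparison by a single
-- interleaved bidirectional probe stopping at the nearest free value (preferring up); equivalence
-- is about the return value (both Pythons also write the result back into arr in place).


-- termination helper (cited by the WF recursions below)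
theorem au_length_filter_lt {l : List Int} {p q : Int → Bool}
    (hpq : ∀ y, q y = true → p y = true) {a : Int}
    (ha : a ∈ l) (hpa : p a = true) (hqa : q a = false) :
    (l.filter q).length < (l.filter p).length := by
  induction l with
  | nil => cases ha
  | cons b t ih =>
    by_cases hb : b = a
    · subst hb
      simp only [List.filter_cons, hpa, hqa]
      have : (t.filter q).length ≤ (t.filter p).length :=
        List.Sublist.length_le (List.monotone_filter_right t hpq)
      simpa using Nat.lt_succ_of_le this
    · have ha' : a ∈ t := by cases ha with
        | head => exact absurd rfl hb
        | tail _ h => exact h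
      have := ih ha'
      simp only [List.filter_cons]
      by_cases hqb : q b = true
      · simp [hqb, hpq b hqb]; omega
      · simp only [hqb, Bool.false_eq_true, if_false]
        by_cases hpb : p b = true <;> simp [hpb] <;> omega

-- ===== PORT A =====
-- while (original + incrementos) in seen: incrementos += 1
def auCountUp (seen : PySem.Set Int) (x : Int) (k : Int) : Int :=
  if (x + k) ∈ seen then auCountUp seen x (k + 1) else k
termination_by (seen.filter (fun y => x + k ≤ y)).length
decreasing_by
  exact au_length_filter_lt (p := fun y => decide (x + k ≤ y)) (q := fun y => decide (x + (k+1) ≤ y))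
    (fun y hy => by simp at hy ⊢; omega) (by assumption) (by simp) (by simp)

-- while (original - decrementos) in seen: decrementos += 1
def auCountDown (seen : PySem.Set Int) (x : Int) (k : Int) : Int :=
  if (x - k) ∈ seen then auCountDown seen x (k + 1) else k
termination_by (seen.filter (fun y => y ≤ x - k)).length
decreasing_by
  exact au_length_filter_lt (p := fun y => decide (y ≤ x - k)) (q := fun y => decide (y ≤ x - (k+1)))
    (fun y hy => by simp at hy ⊢; omega) (by assumption) (by simp) (by simp; omega)

-- one iteration of A's for-loop; i is always in range(len a), so pyGetD a i 0 is exactly arr[i]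
-- and List.set i.toNat is exactly arr[i] = v
def auStepA (st : List Int × PySem.Set Int × Int) (i : Int) : List Int × PySem.Set Int × Int :=
  let a := st.1
  let seen := st.2.1
  let operaciones := st.2.2
  let original := PySem.List.pyGetD a i 0
  let incrementos := auCountUp seen original 0
  let decrementos := auCountDown seen original 0
  if incrementos ≤ decrementos then
    (a.set i.toNat (original + incrementos),
     PySem.Set.add seen (original + incrementos), operaciones + incrementos)
  else
    (a.set i.toNat (original - decrementos),
     PySem.Set.add seen (original - decrementos), operaciones + decrementos)

def hacer_unicos (arr : List Int) : List Int × Int :=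
  let st := (PySem.List.pyRange 0 (arr.length : Int) 1).foldl auStepA (arr, PySem.Set.empty, 0)
  (st.1, st.2.2)

-- ===== PORT B =====
-- the bidirectional probe: first free among x+k, x-k for k = 0,1,2,..., preferring x+k
def auProbe (seen : PySem.Set Int) (x : Int) (k : Int) : Int × Int :=
  if (x + k) ∉ seen then (x + k, k)
  else if (x - k) ∉ seen then (x - k, k)
  else auProbe seen x (k + 1)
termination_by (seen.filter (fun y => x + k ≤ y)).length
decreasing_by
  exact au_length_filter_lt (p := fun y => decide (x + k ≤ y)) (q := fun y => decide (x + (k+1) ≤ y))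
    (fun y hy => by simp at hy ⊢; omega) (by simpa using ‹¬(x + k ∉ seen)›) (by simp) (by simp)

def auStepB (st : List Int × PySem.Set Int × Int) (x : Int) : List Int × PySem.Set Int × Int :=
  let p := auProbe st.2.1 x 0
  (st.1 ++ [p.1], PySem.Set.add st.2.1 p.1, st.2.2 + p.2)

def hacer_unicos_alt (arr : List Int) : List Int × Int :=
  let st := arr.foldl auStepB ([], PySem.Set.empty, 0)
  (st.1, st.2.2)

-- ===== PRECONDITION & SPEC =====
def Spec_hacer_unicos (arr : List Int) (out : List Int × Int) : Prop := out = hacer_unicos_alt arr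
instance (arr : List Int) (out : List Int × Int) : Decidable (Spec_hacer_unicos arr out) := by unfold Spec_hacer_unicos; infer_instance

-- ===== CLAIM (what is proved, stated in full; the proofs are below) =====
def Claim_equal_hacer_unicos : Prop := ∀ (arr : List Int), Dom_hacer_unicos arr → Spec_hacer_unicos arr (hacer_unicos arr)

-- ===== LEMMAS AND PROOFS =====
theorem auCountUp_ge (seen : PySem.Set Int) (x k : Int) : k ≤ auCountUp seen x k := by
  fun_induction auCountUp seen x k with
  | case1 k h ih => omega
  | case2 k h => omega

theorem auCountDown_ge (seen : PySem.Set Int) (x k : Int) : k ≤ auCountDown seen x k := by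
  fun_induction auCountDown seen x k with
  | case1 k h ih => omega
  | case2 k h => omega

-- B's probe equals A's "two scans, pick the smaller, ties up"
theorem auProbe_eq (seen : PySem.Set Int) (x k : Int) :
    auProbe seen x k =
      if auCountUp seen x k ≤ auCountDown seen x k
      then (x + auCountUp seen x k, auCountUp seen x k)
      else (x - auCountDown seen x k, auCountDown seen x k) := by
  fun_induction auProbe seen x k with
  | case1 k h =>
    have hcu : auCountUp seen x k = k := by rw [auCountUp, if_neg h]
    rw [hcu, if_pos (auCountDown_ge seen x k)]
  | case2 k h1 h2 =>
    have h1' : (x + k) ∈ seen := by simpa using h1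
    have hcu : auCountUp seen x k = auCountUp seen x (k + 1) := by rw [auCountUp, if_pos h1']
    have hcd : auCountDown seen x k = k := by rw [auCountDown, if_neg h2]
    have := auCountUp_ge seen x (k + 1)
    rw [hcu, hcd, if_neg (by omega)]
  | case3 k h1 h2 ih =>
    have h1' : (x + k) ∈ seen := by simpa using h1
    have h2' : (x - k) ∈ seen := by simpa using h2
    have hcu : auCountUp seen x k = auCountUp seen x (k + 1) := by rw [auCountUp, if_pos h1']
    have hcd : auCountDown seen x k = auCountDown seen x (k + 1) := by
      rw [auCountDown, if_pos h2']
    rw [hcu, hcd]; exact ih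

-- each A step on (done ++ x :: rest) at index done.length is a B step on x
theorem auStep_corr (done rest : List Int) (x : Int) (seen : PySem.Set Int) (ops : Int) :
    auStepA (done ++ x :: rest, seen, ops) (done.length : Int)
      = (let st := auStepB (done, seen, ops) x; (st.1 ++ rest, st.2.1, st.2.2)) := by
  simp only [auStepA, auStepB, auProbe_eq]
  have hget : PySem.List.pyGetD (done ++ x :: rest) (done.length : Int) 0 = x := by
    rw [PySem.List.pyGetD_natCast]
    simp
  rw [hget]
  split_ifs with h
  · simp
  · simp

-- the generalized loop correspondence: A's index loop over the suffix equals B's element fold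
theorem auLoop_corr (rest : List Int) : ∀ (done : List Int) (seen : PySem.Set Int) (ops : Int),
    (PySem.List.pyRange (done.length : Int) ((done.length : Int) + (rest.length : Int)) 1).foldl
        auStepA (done ++ rest, seen, ops)
      = rest.foldl auStepB (done, seen, ops) := by
  induction rest with
  | nil => intro done seen ops; simp [PySem.List.pyRange_one_eq_nil]
  | cons x rest ih =>
    intro done seen ops
    rw [PySem.List.pyRange_one_cons (by simp)]
    simp only [List.foldl_cons]
    rw [auStep_corr]
    simp only [auStepB]
    have H := ih (done ++ [(auProbe seen x 0).1]) (PySem.Set.add seen (auProbe seen x 0).1)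
      (ops + (auProbe seen x 0).2)
    have h1 : ((done ++ [(auProbe seen x 0).1]).length : Int) = (done.length : Int) + 1 := by
      simp
    have h2 : (done.length : Int) + ((x :: rest).length : Int)
        = ((done ++ [(auProbe seen x 0).1]).length : Int) + (rest.length : Int) := by
      simp; ring
    rw [h2, ← h1]
    exact H

-- ===== VERDICT (by name: the statement is the Claim_ definition above) =====
theorem hacer_unicos_spec : Claim_equal_hacer_unicos := by
  intro arr _
  unfold Spec_hacer_unicos hacer_unicos hacer_unicos_alt
  have H := auLoop_corr arr [] PySem.Set.empty 0
  simp only [List.length_nil, Nat.cast_zero, List.nil_append, zero_add] at H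
  rw [H]
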